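-- pv_equiv track=rewrite | github.com/5d5ng/ForCodingTest | Python/2020공채 카카오/p4.py | solution
-- ===== SOURCE A (Python) =====
-- import heapq,copy
--
-- def solution(n, s, a, b, fares):
--     graph  = [[] for i in range(n+1) ]
--     for u,v,w in fares:
--         graph[u].append([v,w])
--         graph[v].append([u,w])
--     tmpg = copy.deepcopy(graph)
--
--     load = dijkstra(n,s,tmpg)
--     val = load[a]+load[b]
--     val = min (dijkstra(n,a,tmpg)[b] + load[a], val)
--     val = min (dijkstra(n,b,tmpg)[a] + load[b], val)
--
--     return val
--
-- def dijkstra(n,k,g):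
--     inf = 10000000+1
--     q = []
--     route = []
--     k_d = [inf for _ in range(n+1)]
--     k_d[k] = 0
--     heapq.heappush(q,[0,k])
--     route.append(k)
--     while q:
--         mid = heapq.heappop(q)
--         for end in g[mid[1]]:
--             if k_d[end[0]] > mid[0] + end[1]:
--                 k_d[end[0]] = mid[0] + end[1]
--                 route.append(end)
--                 heapq.heappush(q,[k_d[end[0]] ,end[0] ])
--
--     return k_d
-- ===== SOURCE B (Python) =====
-- def solution(n, s, a, b, fares):
--     # Bellman-Ford-style relaxation to a fixpoint over the plain edge list,
--     # instead of A's three heap-based Dijkstra runs over adjacency lists.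
--     inf = 10000001
--
--     def dist(src):
--         d = [inf] * (n + 1)
--         d[src] = 0
--         changed = True
--         while changed:
--             changed = False
--             for u, v, w in fares:
--                 if d[u] + w < d[v]:
--                     d[v] = d[u] + w
--                     changed = True
--                 if d[v] + w < d[u]:
--                     d[u] = d[v] + w
--                     changed = True
--         return d
--
--     ds = dist(s)
--     da = dist(a)
--     db = dist(b)
--     return min(ds[a] + ds[b], ds[a] + da[b], ds[b] + db[a])
-- ===== Notes on version B (the rewrite author's own statement) =====
-- stated objective: alternative
-- what changed: Replaces the three heap-based Dijkstra runs over adjacency lists (with deepcopy) by three Bellman-Ford-style fixpoint relaxations that sweep the raw fares list until no distance changes; no heap, no adjacency structure.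
-- outside the precondition, e.g. on solution(2, 0, 0, 0, [[1, 2, -5]]): A returns 0, B does not finish within the time limit
import Mathlib
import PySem

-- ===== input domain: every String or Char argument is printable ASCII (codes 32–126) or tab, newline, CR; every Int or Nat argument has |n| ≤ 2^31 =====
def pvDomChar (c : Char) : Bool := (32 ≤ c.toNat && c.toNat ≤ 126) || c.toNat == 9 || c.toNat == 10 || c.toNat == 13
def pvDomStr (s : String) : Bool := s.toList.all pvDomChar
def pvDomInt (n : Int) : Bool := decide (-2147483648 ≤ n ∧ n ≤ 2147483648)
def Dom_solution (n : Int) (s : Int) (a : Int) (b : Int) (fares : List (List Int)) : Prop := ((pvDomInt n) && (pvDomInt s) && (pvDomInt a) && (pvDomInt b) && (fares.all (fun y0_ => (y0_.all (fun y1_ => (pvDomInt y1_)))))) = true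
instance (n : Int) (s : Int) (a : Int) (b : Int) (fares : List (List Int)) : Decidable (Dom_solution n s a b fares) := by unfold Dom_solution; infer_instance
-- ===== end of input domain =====

-- B replaces A's three heap-based Dijkstra runs by three Bellman-Ford-style fixpoint
-- relaxation sweeps over the raw fares list (alternative algorithm, no speed claim).

-- ===== PORT A =====

/-- Python index wraparound: effective index of `i` into a list of length `m` (in range under Pre_). -/
def pvIx (m i : Int) : Nat := (if i < 0 then i + m else i).toNat

/-- Python `<` on the 2-element int lists `[c, x]` stored in A's heap: lexicographic. -/
def heapLt (p q : Int × Int) : Bool := p.1 < q.1 || (p.1 == q.1 && p.2 < q.2)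

/-- heapq._siftdown(heap, startpos, pos) with `item` (= heap[pos]) carried explicitly. -/
def pvSiftdown (heap : List (Int × Int)) (startpos pos : Nat) (item : Int × Int) :
    List (Int × Int) :=
  if _h : startpos < pos then
    let parentpos := (pos - 1) / 2
    let parent := heap.getD parentpos (0, 0)
    if heapLt item parent then
      pvSiftdown (heap.set pos parent) startpos parentpos item
    else heap.set pos item
  else heap.set pos item
termination_by pos
decreasing_by omega

/-- heapq._siftup's child-promoting loop; ends with heap[pos] = newitem then _siftdown. -/
def pvSiftup (heap : List (Int × Int)) (startpos pos : Nat) (newitem : Int × Int) :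
    List (Int × Int) :=
  let endpos := heap.length
  let childpos := 2 * pos + 1
  if _h : childpos < endpos then
    let rightpos := childpos + 1
    let childpos :=
      if rightpos < endpos && !heapLt (heap.getD childpos (0, 0)) (heap.getD rightpos (0, 0)) then
        rightpos
      else childpos
    pvSiftup (heap.set pos (heap.getD childpos (0, 0))) startpos childpos newitem
  else pvSiftdown (heap.set pos newitem) startpos pos newitem
termination_by heap.length - pos
decreasing_by simp only [List.length_set]; split <;> omega

/-- heapq.heappush. -/
def pvHeappush (heap : List (Int × Int)) (item : Int × Int) : List (Int × Int) :=
  pvSiftdown (heap ++ [item]) 0 heap.length item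

/-- heapq.heappop (A's loop guard guarantees nonemptiness; junk on []). -/
def pvHeappop (heap : List (Int × Int)) : (Int × Int) × List (Int × Int) :=
  let lastelt := heap.getLast?.getD (0, 0)
  let rest := heap.dropLast
  if rest.isEmpty then (lastelt, [])
  else (rest.getD 0 (0, 0), pvSiftup (rest.set 0 lastelt) 0 0 lastelt)

/-- A's graph construction: `graph[u].append([v,w]); graph[v].append([u,w])`. -/
def pvBuildGraph (n : Int) (fares : List (List Int)) : List (List (Int × Int)) :=
  fares.foldl (fun g f =>
    match f with
    | [u, v, w] =>
      let iu := pvIx (n + 1) u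
      let g1 := g.set iu (g.getD iu [] ++ [(v, w)])
      let iv := pvIx (n + 1) v
      g1.set iv (g1.getD iv [] ++ [(u, w)])
    | _ => g) (List.replicate (n + 1).toNat [])

/-- A's `while q:` loop (fuel only makes it total; under Pre_ the fuel always suffices). -/
def pvDijkLoop (g : List (List (Int × Int))) (m : Int) :
    Nat → List (Int × Int) → List Int → List Int
  | 0, _, kd => kd
  | fuel + 1, q, kd =>
    if q.isEmpty then kd
    else
      let (mid, q1) := pvHeappop q
      let st := (g.getD (pvIx m mid.2) []).foldl (fun (st : List (Int × Int) × List Int) e =>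
        let (q, kd) := st
        if kd.getD (pvIx m e.1) 0 > mid.1 + e.2 then
          (pvHeappush q (mid.1 + e.2, e.1), kd.set (pvIx m e.1) (mid.1 + e.2))
        else st) (q1, kd)
      pvDijkLoop g m fuel st.1 st.2

/-- A's dijkstra(n, k, g); the write-only `route` list is omitted. -/
def pvDijkstra (n k : Int) (g : List (List (Int × Int))) : List Int :=
  let inf : Int := 10000000 + 1
  let m := n + 1
  let kd := (List.replicate m.toNat inf).set (pvIx m k) 0
  let q := pvHeappush [] (0, k)
  pvDijkLoop g m (2 * m.toNat * 10000001 + 2) q kd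

def solution (n : Int) (s : Int) (a : Int) (b : Int) (fares : List (List Int)) : Int :=
  let m := n + 1
  let graph := pvBuildGraph n fares
  let load := pvDijkstra n s graph
  let val := load.getD (pvIx m a) 0 + load.getD (pvIx m b) 0
  let val := min ((pvDijkstra n a graph).getD (pvIx m b) 0 + load.getD (pvIx m a) 0) val
  let val := min ((pvDijkstra n b graph).getD (pvIx m a) 0 + load.getD (pvIx m b) 0) val
  val

-- ===== PORT B =====

/-- One sweep of B's inner `for u, v, w in fares` round (state: distances, changed flag). -/
def pvRelaxRound (fares : List (List Int)) (m : Int) (st : List Int × Bool) : List Int × Bool :=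
  fares.foldl (fun st f =>
    match f with
    | [u, v, w] =>
      let iu := pvIx m u
      let iv := pvIx m v
      let st1 := if st.1.getD iu 0 + w < st.1.getD iv 0 then
          (st.1.set iv (st.1.getD iu 0 + w), true) else st
      if st1.1.getD iv 0 + w < st1.1.getD iu 0 then
        (st1.1.set iu (st1.1.getD iv 0 + w), true) else st1
    | _ => st) st

/-- B's `while changed:` loop (fuel only makes it total; under Pre_ the fuel always suffices). -/
def pvRelaxLoop (fares : List (List Int)) (m : Int) : Nat → List Int → List Int
  | 0, d => d
  | fuel + 1, d =>
    let st := pvRelaxRound fares m (d, false)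
    if st.2 then pvRelaxLoop fares m fuel st.1 else st.1

/-- B's dist(src). -/
def pvBDist (n src : Int) (fares : List (List Int)) : List Int :=
  let m := n + 1
  let d := (List.replicate m.toNat (10000001 : Int)).set (pvIx m src) 0
  pvRelaxLoop fares m (m.toNat * 10000001 + 1) d

def solution_alt (n : Int) (s : Int) (a : Int) (b : Int) (fares : List (List Int)) : Int :=
  let m := n + 1
  let ds := pvBDist n s fares
  let da := pvBDist n a fares
  let db := pvBDist n b fares
  min (min (ds.getD (pvIx m a) 0 + ds.getD (pvIx m b) 0)
           (ds.getD (pvIx m a) 0 + da.getD (pvIx m b) 0))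
      (ds.getD (pvIx m b) 0 + db.getD (pvIx m a) 0)

-- ===== PRECONDITION & SPEC =====

/-- Python accepts index `i` into a list of length `n+1` (with negative wraparound). -/
def pvInIdx (n i : Int) : Prop := -(n + 1) ≤ i ∧ i ≤ n

-- Pre_ excludes the inputs on which A raises (n < 0, a node index outside [-(n+1), n], a fare
-- row without exactly 3 entries) and negative fare weights: a reachable negative undirected
-- edge is a negative cycle on which A's relax loop runs forever, and B's global fixpoint
-- relaxation diverges even when such an edge is unreachable (A then still returns — see cites).
def Pre_solution (n : Int) (s : Int) (a : Int) (b : Int) (fares : List (List Int)) : Prop :=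
  0 ≤ n ∧ pvInIdx n s ∧ pvInIdx n a ∧ pvInIdx n b ∧
  ∀ f ∈ fares, f.length = 3 ∧ pvInIdx n (f.getD 0 0) ∧ pvInIdx n (f.getD 1 0) ∧ 0 ≤ f.getD 2 0

instance (n : Int) (s : Int) (a : Int) (b : Int) (fares : List (List Int)) :
    Decidable (Pre_solution n s a b fares) := by unfold Pre_solution pvInIdx; infer_instance

def pvWitness_solution : Int × Int × Int × Int × List (List Int) :=
  (2, 0, 1, 2, [[0, 1, 3], [1, 2, 4]])

def Spec_solution (n : Int) (s : Int) (a : Int) (b : Int) (fares : List (List Int)) (out : Int) : Prop := out = solution_alt n s a b fares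
instance (n : Int) (s : Int) (a : Int) (b : Int) (fares : List (List Int)) (out : Int) : Decidable (Spec_solution n s a b fares out) := by unfold Spec_solution; infer_instance

-- ===== CLAIM (what is proved, stated in full; the proofs are below) =====
def Claim_equal_solution : Prop := ∀ (n : Int) (s : Int) (a : Int) (b : Int) (fares : List (List Int)), Dom_solution n s a b fares → Pre_solution n s a b fares → Spec_solution n s a b fares (solution n s a b fares)

-- ===== LEMMAS AND PROOFS =====

/-- The sentinel `inf`. -/
def pvInf : Int := 10000001

/-- `x` and `y` (already wrapped into `[0, m)`) are joined by a fare of weight `w`. -/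
def EdgeP (m : Int) (fares : List (List Int)) (x y : Nat) (w : Int) : Prop :=
  ∃ u v, [u, v, w] ∈ fares ∧
    ((pvIx m u = x ∧ pvIx m v = y) ∨ (pvIx m v = x ∧ pvIx m u = y))

/-- There is a walk from `src` to `i` of total weight `c`. -/
inductive PLP (m : Int) (fares : List (List Int)) (src : Nat) : Nat → Int → Prop
  | refl : PLP m fares src src 0
  | step {x y : Nat} {c w : Int} :
      PLP m fares src x c → EdgeP m fares x y w → PLP m fares src y (c + w)

/-- Basic state invariant shared by both algorithms: right length, entries in `[0, inf]`,
source entry 0, every non-`inf` entry realized by a walk. -/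
def PvBase (m : Int) (fares : List (List Int)) (src : Nat) (kd : List Int) : Prop :=
  kd.length = m.toNat ∧ kd.getD src 0 = 0 ∧
  ∀ i, i < m.toNat →
    0 ≤ kd.getD i 0 ∧ kd.getD i 0 ≤ pvInf ∧
      (kd.getD i 0 = pvInf ∨ PLP m fares src i (kd.getD i 0))

/-- Full characterization of the result both algorithms compute. -/
def PvGood (m : Int) (fares : List (List Int)) (src : Nat) (d : List Int) : Prop :=
  d.length = m.toNat ∧
  (∀ i, i < m.toNat → d.getD i 0 ≤ pvInf ∧ (d.getD i 0 = pvInf ∨ PLP m fares src i (d.getD i 0))) ∧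
  (∀ i, i < m.toNat → ∀ c, PLP m fares src i c → d.getD i 0 ≤ c)

/-- Common context: well-formed rows, in-range source, adjacency structure `g` of `fares`. -/
structure PvCtx (n : Int) (fares : List (List Int)) (src : Nat)
    (g : List (List (Int × Int))) : Prop where
  hn : 0 ≤ n
  hsrc : src < (n + 1).toNat
  rows : ∀ f ∈ fares, f.length = 3 ∧ pvInIdx n (f.getD 0 0) ∧ pvInIdx n (f.getD 1 0) ∧
    0 ≤ f.getD 2 0
  glen : g.length = (n + 1).toNat
  gmem : ∀ x, x < (n + 1).toNat → ∀ vw : Int × Int,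
    (vw ∈ g.getD x [] ↔ ∃ u v, [u, v, vw.2] ∈ fares ∧
      ((pvIx (n + 1) u = x ∧ vw.1 = v) ∨ (pvIx (n + 1) v = x ∧ vw.1 = u)))

-- ---- small getD / set helpers ----

theorem pv_getD_set_self {α : Type} (l : List α) (i : Nat) (v d : α) (h : i < l.length) :
    (l.set i v).getD i d = v := by
  simp [List.getD_eq_getElem?_getD, h]

theorem pv_getD_set_ne {α : Type} (l : List α) (i j : Nat) (v d : α) (h : j ≠ i) :
    (l.set i v).getD j d = l.getD j d := by
  simp [List.getD_eq_getElem?_getD, List.getElem?_set_ne (fun hh => h hh.symm)]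

theorem pv_ix_lt (n i : Int) (hn : 0 ≤ n) (h : pvInIdx n i) : pvIx (n + 1) i < (n + 1).toNat := by
  unfold pvIx pvInIdx at *; split <;> omega

-- ---- walk facts ----

theorem pv_edge_facts {n : Int} {fares : List (List Int)} {src : Nat}
    {g : List (List (Int × Int))} (hc : PvCtx n fares src g) {x y : Nat} {w : Int}
    (h : EdgeP (n + 1) fares x y w) :
    x < (n + 1).toNat ∧ y < (n + 1).toNat ∧ 0 ≤ w := by
  obtain ⟨u, v, hm, hcase⟩ := h
  have hr := hc.rows _ hm
  simp only [List.getD] at hr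
  rcases hcase with ⟨h1, h2⟩ | ⟨h1, h2⟩ <;>
    exact ⟨by rw [← h1]; exact pv_ix_lt _ _ hc.hn (by tauto),
           by rw [← h2]; exact pv_ix_lt _ _ hc.hn (by tauto), by tauto⟩

theorem pv_plp_nonneg {n : Int} {fares : List (List Int)} {src : Nat}
    {g : List (List (Int × Int))} (hc : PvCtx n fares src g) {i : Nat} {c : Int}
    (h : PLP (n + 1) fares src i c) : 0 ≤ c := by
  induction h with
  | refl => omega
  | step _ he ih => have := (pv_edge_facts hc he).2.2; omega

theorem pv_plp_lt {n : Int} {fares : List (List Int)} {src : Nat}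
    {g : List (List (Int × Int))} (hc : PvCtx n fares src g) {i : Nat} {c : Int}
    (h : PLP (n + 1) fares src i c) : i < (n + 1).toNat := by
  induction h with
  | refl => exact hc.hsrc
  | step _ he _ => exact (pv_edge_facts hc he).2.1

-- ---- uniqueness of the characterized result ----

theorem pv_good_unique {m : Int} {fares : List (List Int)} {src : Nat} {d e : List Int}
    (h1 : PvGood m fares src d) (h2 : PvGood m fares src e) : d = e := by
  obtain ⟨l1, h1, m1⟩ := h1
  obtain ⟨l2, h2, m2⟩ := h2
  apply List.ext_getElem (by omega)
  intro i hi hi'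
  have hiN : i < m.toNat := by omega
  have hd : d.getD i 0 = d[i] := List.getD_eq_getElem d 0 hi
  have he : e.getD i 0 = e[i] := List.getD_eq_getElem e 0 hi'
  rw [← hd, ← he]
  rcases (h1 i hiN).2 with hdi | hdi
  · rcases (h2 i hiN).2 with hei | hei
    · rw [hdi, hei]
    · have := m1 i hiN _ hei
      have := (h2 i hiN).1
      omega
  · rcases (h2 i hiN).2 with hei | hei
    · have := m2 i hiN _ hdi
      have := (h1 i hiN).1
      omega
    · have := m1 i hiN _ hei
      have := m2 i hiN _ hdi
      omega

-- ---- heap permutation lemmas ----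

theorem pv_cons_set_perm {α : Type} (l : List α) (j : Nat) (x : α) (hj : j < l.length) :
    (l[j] :: l.set j x).Perm (x :: l) := by
  induction l generalizing j with
  | nil => simp at hj
  | cons a t ih =>
    cases j with
    | zero => simpa using List.Perm.swap x a t
    | succ j =>
      have hj' : j < t.length := by simpa using hj
      simp only [List.getElem_cons_succ, List.set_cons_succ]
      exact ((List.Perm.swap _ _ _).trans ((ih j hj').cons a)).trans (List.Perm.swap _ _ _)

theorem pv_set_set_perm {α : Type} (l : List α) (i j : Nat) (x : α) (hij : i ≠ j)
    (hi : i < l.length) (hj : j < l.length) :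
    ((l.set i (l[j]'hj)).set j x).Perm (l.set i x) := by
  have hj2 : j < (l.set i l[j]).length := by simpa using hj
  have hA : (l.set i l[j])[j] = l[j] := List.getElem_set_ne hij hj2
  have p1 : (l[j] :: (l.set i l[j]).set j x).Perm (x :: l.set i l[j]) := by
    have := pv_cons_set_perm (l.set i l[j]) j x hj2
    rwa [hA] at this
  have p2 : (l[i] :: l.set i l[j]).Perm (l[j] :: l) := pv_cons_set_perm _ i l[j] hi
  have p3 : (l[i] :: l.set i x).Perm (x :: l) := pv_cons_set_perm _ i x hi
  have q1 : (l[i] :: l[j] :: (l.set i l[j]).set j x).Perm (l[i] :: x :: l.set i l[j]) :=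
    List.Perm.cons _ p1
  have q2 : (l[i] :: x :: l.set i l[j]).Perm (x :: l[j] :: l) :=
    (List.Perm.swap _ _ _).trans (p2.cons x)
  have q3 : (x :: l[j] :: l).Perm (l[j] :: l[i] :: l.set i x) :=
    (List.Perm.swap _ _ _).trans (p3.symm.cons l[j])
  have big : (l[i] :: l[j] :: (l.set i l[j]).set j x).Perm (l[i] :: l[j] :: l.set i x) :=
    ((q1.trans q2).trans q3).trans (List.Perm.swap _ _ _)
  exact big.cons_inv.cons_inv

theorem pv_siftdown_perm (heap : List (Int × Int)) (sp pos : Nat) (item : Int × Int)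
    (h : pos < heap.length) : (pvSiftdown heap sp pos item).Perm (heap.set pos item) := by
  fun_induction pvSiftdown heap sp pos item with
  | case1 a b c d e f g =>
    have hdd : d = (b - 1) / 2 := rfl
    have hd : d < a.length := by omega
    have hee : e = a[d] := List.getD_eq_getElem a (0, 0) hd
    have ih := g (by simpa using hd)
    rw [hee] at ih ⊢
    exact ih.trans (pv_set_set_perm a b d item (by omega) h hd)
  | case2 => exact List.Perm.refl _
  | case3 => exact List.Perm.refl _

theorem pv_siftup_perm (heap : List (Int × Int)) (sp pos : Nat) (item : Int × Int)
    (h : pos < heap.length) : (pvSiftup heap sp pos item).Perm (heap.set pos item) := by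
  fun_induction pvSiftup heap sp pos item with
  | case1 a b c d e f g i =>
    have hgc : g < a.length := by
      simp only [g, f]
      split
      · rename_i hcond
        rw [Bool.and_eq_true, decide_eq_true_eq] at hcond
        simp only [d, c] at *
        omega
      · simp only [d, c] at e
        omega
    have hgb : g ≠ b := by
      have : d ≤ g := by
        simp only [g]; split
        · simp only [f]; omega
        · omega
      simp only [d] at this
      omega
    have ih := i (by simpa using hgc)
    have hcast : a.getD g (0, 0) = a[g] := List.getD_eq_getElem a (0, 0) hgc
    rw [hcast] at ih ⊢
    exact ih.trans (pv_set_set_perm a b g item (Ne.symm hgb) h hgc)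
  | case2 a b c d e =>
    have := pv_siftdown_perm (a.set b item) sp b item (by simpa using h)
    simpa [List.set_set] using this

theorem pv_heappush_perm (heap : List (Int × Int)) (item : Int × Int) :
    (pvHeappush heap item).Perm (item :: heap) := by
  unfold pvHeappush
  have h : heap.length < (heap ++ [item]).length := by simp
  have := pv_siftdown_perm (heap ++ [item]) 0 heap.length item h
  have hset : (heap ++ [item]).set heap.length item = heap ++ [item] := by
    rw [List.set_append_right _ _ (le_refl _)]
    simp
  rw [hset] at this
  exact this.trans (List.perm_append_singleton _ _)

theorem pv_heappop_perm (heap : List (Int × Int)) (h : heap ≠ []) :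
    heap.Perm ((pvHeappop heap).1 :: (pvHeappop heap).2) := by
  unfold pvHeappop
  have hlast : heap.getLast?.getD (0, 0) = heap.getLast h := by
    rw [List.getLast?_eq_some_getLast h]; rfl
  have hsplit : heap.dropLast ++ [heap.getLast h] = heap := List.dropLast_append_getLast h
  by_cases hre : heap.dropLast.isEmpty
  · simp only [hre, if_pos]
    rw [hlast]
    conv_lhs => rw [← hsplit, List.isEmpty_iff.mp hre]
    exact List.Perm.refl _
  · simp only [hre, if_neg, Bool.false_eq_true, not_false_iff]
    have hrne : heap.dropLast ≠ [] := fun hh => hre (by simp [hh])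
    have h0 : 0 < heap.dropLast.length := List.length_pos_of_ne_nil hrne
    have hg0 : heap.dropLast.getD 0 (0,0) = heap.dropLast[0] := List.getD_eq_getElem _ _ h0
    have hsu := pv_siftup_perm (heap.dropLast.set 0 (heap.getLast?.getD (0, 0))) 0 0
      (heap.getLast?.getD (0, 0)) (by simpa using h0)
    rw [List.set_set] at hsu
    -- heap ~ rest[0] :: rest.set 0 last
    have hc := pv_cons_set_perm heap.dropLast 0 (heap.getLast?.getD (0, 0)) h0
    -- hc : rest[0] :: rest.set 0 last ~ last :: rest
    refine List.Perm.trans ?_ ((List.Perm.cons _ hsu.symm))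
    rw [hg0]
    refine List.Perm.trans ?_ hc.symm
    rw [hlast]
    conv_lhs => rw [← hsplit]
    exact List.perm_append_singleton _ _

-- ---- measure ----

def pvSumNat (kd : List Int) : Nat := (kd.map Int.toNat).sum

theorem pv_sumNat_set_lt (kd : List Int) (i : Nat) (v : Int) (h : i < kd.length)
    (hv : 0 ≤ v) (hlt : v < kd.getD i 0) : pvSumNat (kd.set i v) < pvSumNat kd := by
  induction kd generalizing i with
  | nil => simp at h
  | cons x t ih =>
    cases i with
    | zero =>
      simp only [pvSumNat, List.set_cons_zero, List.map_cons, List.sum_cons]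
      have : v.toNat < x.toNat := by
        simp only [List.getD_cons_zero] at hlt; omega
      omega
    | succ i =>
      have hh : i < t.length := by simpa using h
      have hl : v < t.getD i 0 := by simpa using hlt
      have := ih i hh hl
      simp only [pvSumNat, List.set_cons_succ, List.map_cons, List.sum_cons] at *
      omega

theorem pv_sumNat_le (kd : List Int) (c : Nat) (h : ∀ x ∈ kd, x.toNat ≤ c) :
    pvSumNat kd ≤ kd.length * c := by
  have := List.sum_le_card_nsmul (kd.map Int.toNat) c (by
    intro x hx
    obtain ⟨y, hy, rfl⟩ := List.mem_map.mp hx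
    exact h y hy)
  simpa [pvSumNat, Nat.mul_comm] using this

-- ---- A-side invariant ----

def PvQProp (m : Int) (fares : List (List Int)) (src : Nat) (kd : List Int)
    (q : List (Int × Int)) : Prop :=
  ∀ p ∈ q, pvIx m p.2 < m.toNat ∧ PLP m fares src (pvIx m p.2) p.1 ∧
    kd.getD (pvIx m p.2) 0 ≤ p.1

def PvClosedAt (m : Int) (g : List (List (Int × Int))) (kd : List Int)
    (q : List (Int × Int)) (u : Nat) : Prop :=
  kd.getD u 0 = pvInf ∨ (∃ p ∈ q, pvIx m p.2 = u ∧ p.1 = kd.getD u 0) ∨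
    ∀ vw ∈ g.getD u [], kd.getD (pvIx m vw.1) 0 ≤ kd.getD u 0 + vw.2

def PvDInv (n : Int) (fares : List (List Int)) (src : Nat) (g : List (List (Int × Int)))
    (q : List (Int × Int)) (kd : List Int) : Prop :=
  PvBase (n + 1) fares src kd ∧ PvQProp (n + 1) fares src kd q ∧
    ∀ u, u < (n + 1).toNat → PvClosedAt (n + 1) g kd q u

/-- What holds of A's distance array when the loop ends. -/
def PvPost (n : Int) (fares : List (List Int)) (src : Nat) (kd : List Int) : Prop :=
  PvBase (n + 1) fares src kd ∧
    ∀ x y : Nat, ∀ w : Int, EdgeP (n + 1) fares x y w →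
      kd.getD y 0 ≤ kd.getD x 0 + w

theorem pv_post_good {n : Int} {fares : List (List Int)} {src : Nat}
    {g : List (List (Int × Int))} (hc : PvCtx n fares src g) {kd : List Int}
    (h : PvPost n fares src kd) : PvGood (n + 1) fares src kd := by
  obtain ⟨⟨hlen, hsrc0, hbd⟩, hclo⟩ := h
  refine ⟨hlen, fun i hi => ⟨(hbd i hi).2.1, (hbd i hi).2.2⟩, fun i hi c hplp => ?_⟩
  induction hplp with
  | refl => omega
  | @step x y c w hx he ih =>
    have hxlt := pv_plp_lt hc hx
    have h1 := hclo x y w he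
    have := ih hxlt
    omega

-- the single-relaxation step of A's inner loop
theorem pv_relax_step {n : Int} {fares : List (List Int)} {src : Nat}
    {g : List (List (Int × Int))} (hc : PvCtx n fares src g)
    (c : Int) (nx : Nat) (hnx : nx < (n + 1).toNat) (hplc : PLP (n + 1) fares src nx c)
    (q : List (Int × Int)) (kd : List Int) (e : Int × Int) (he : e ∈ g.getD nx [])
    (hb : PvBase (n + 1) fares src kd) (hq : PvQProp (n + 1) fares src kd q)
    (hcle : kd.getD nx 0 ≤ c) :
    let st := if kd.getD (pvIx (n + 1) e.1) 0 > c + e.2 then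
        (pvHeappush q (c + e.2, e.1), kd.set (pvIx (n + 1) e.1) (c + e.2))
      else (q, kd)
    PvBase (n + 1) fares src st.2 ∧ PvQProp (n + 1) fares src st.2 st.1 ∧
      (∀ u, u < (n + 1).toNat → u ≠ nx → PvClosedAt (n + 1) g kd q u →
        PvClosedAt (n + 1) g st.2 st.1 u) ∧
      st.2.getD (pvIx (n + 1) e.1) 0 ≤ c + e.2 ∧
      (∀ i, st.2.getD i 0 ≤ kd.getD i 0) ∧ st.2.getD nx 0 = kd.getD nx 0 ∧
      (∀ p ∈ q, p ∈ st.1) ∧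
      2 * pvSumNat st.2 + st.1.length ≤ 2 * pvSumNat kd + q.length := by
  intro st
  obtain ⟨hlen, hsrc0, hbd⟩ := hb
  set t := pvIx (n + 1) e.1 with ht
  have hadj := (hc.gmem nx hnx e).mp he
  obtain ⟨u, v, hm, hcase⟩ := hadj
  have hedge : EdgeP (n + 1) fares nx t e.2 := by
    rcases hcase with ⟨h1, h2⟩ | ⟨h1, h2⟩
    · exact ⟨u, v, hm, Or.inl ⟨h1, by rw [ht, h2]⟩⟩
    · exact ⟨u, v, hm, Or.inr ⟨h1, by rw [ht, h2]⟩⟩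
  have htN : t < (n + 1).toNat := (pv_edge_facts hc hedge).2.1
  have hw : 0 ≤ e.2 := (pv_edge_facts hc hedge).2.2
  have hc0 : 0 ≤ c := pv_plp_nonneg hc hplc
  have hplnew : PLP (n + 1) fares src t (c + e.2) := hplc.step hedge
  by_cases hcond : kd.getD t 0 > c + e.2
  · have hst : st = (pvHeappush q (c + e.2, e.1), kd.set t (c + e.2)) := by
      simp only [st, ← ht]
      rw [if_pos hcond]
    rw [hst]
    set kd' := kd.set t (c + e.2) with hkd'
    set q' := pvHeappush q (c + e.2, e.1) with hq'
    have htlen : t < kd.length := by omega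
    have hget' : kd'.getD t 0 = c + e.2 := pv_getD_set_self kd t _ 0 htlen
    have hgetne : ∀ i, i ≠ t → kd'.getD i 0 = kd.getD i 0 := fun i hi =>
      pv_getD_set_ne kd t i _ 0 hi
    have hmono : ∀ i, kd'.getD i 0 ≤ kd.getD i 0 := by
      intro i
      by_cases hit : i = t
      · subst hit; rw [hget']; omega
      · rw [hgetne i hit]
    have hmemq' : ∀ p, p ∈ q' ↔ p = (c + e.2, e.1) ∨ p ∈ q := fun p =>
      (pv_heappush_perm q (c + e.2, e.1)).mem_iff.trans (List.mem_cons)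
    have hts : t ≠ src := by
      intro hh
      rw [hh, hsrc0] at hcond
      omega
    have hnxt : nx ≠ t := by
      intro hh
      rw [← hh] at hcond
      omega
    have hlen' : kd'.length = (n + 1).toNat := by simp [hkd', hlen]
    have hbase' : PvBase (n + 1) fares src kd' := by
      refine ⟨hlen', by rw [hgetne src (Ne.symm hts)]; exact hsrc0, fun i hi => ?_⟩
      by_cases hit : i = t
      · subst hit
        rw [hget']
        have := hbd t htN
        exact ⟨by omega, by omega, Or.inr (by rw [ht] at hplnew ⊢; exact hplnew)⟩
      · rw [hgetne i hit]; exact hbd i hi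
    have hqp' : PvQProp (n + 1) fares src kd' q' := by
      intro p hp
      rcases (hmemq' p).mp hp with rfl | hpq
      · exact ⟨by simpa using htN, by simpa using hplnew, by simp only []; rw [hget']⟩
      · obtain ⟨h1, h2, h3⟩ := hq p hpq
        exact ⟨h1, h2, le_trans (hmono _) h3⟩
    refine ⟨hbase', hqp', ?_, by rw [hget'], hmono, hgetne nx hnxt, ?_, ?_⟩
    · -- closure preservation for u ≠ nx
      intro u' hu' hune hcl
      by_cases hut : u' = t
      · subst hut
        refine Or.inr (Or.inl ⟨(c + e.2, e.1), (hmemq' _).mpr (Or.inl rfl), ?_, ?_⟩)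
        · exact ht.symm
        · rw [hget']
      · rcases hcl with h1 | ⟨p, hp, hp1, hp2⟩ | h3
        · exact Or.inl (by rw [hgetne u' hut]; exact h1)
        · exact Or.inr (Or.inl ⟨p, (hmemq' p).mpr (Or.inr hp), hp1,
            by rw [hgetne u' hut]; exact hp2⟩)
        · refine Or.inr (Or.inr fun vw hvw => ?_)
          rw [hgetne u' hut]
          exact le_trans (hmono _) (h3 vw hvw)
    · intro p hp; exact (hmemq' p).mpr (Or.inr hp)
    · have hsum : pvSumNat kd' < pvSumNat kd :=
        pv_sumNat_set_lt kd t (c + e.2) htlen (by omega) hcond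
      have hqlen : q'.length = q.length + 1 := by
        have := (pv_heappush_perm q (c + e.2, e.1)).length_eq
        simpa using this
      show 2 * pvSumNat kd' + q'.length ≤ 2 * pvSumNat kd + q.length
      omega
  · have hst : st = (q, kd) := by
      simp only [st, ← ht]
      rw [if_neg hcond]
    rw [hst]
    refine ⟨⟨hlen, hsrc0, hbd⟩, hq, fun u' _ _ hcl => hcl,
      by show kd.getD t 0 ≤ c + e.2; omega, fun i => le_refl _,
      rfl, fun p hp => hp,
      by show 2 * pvSumNat kd + q.length ≤ 2 * pvSumNat kd + q.length; omega⟩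

-- A's inner `for end in g[mid[1]]` fold
theorem pv_relax_fold {n : Int} {fares : List (List Int)} {src : Nat}
    {g : List (List (Int × Int))} (hc : PvCtx n fares src g)
    (c : Int) (nx : Nat) (hnx : nx < (n + 1).toNat) (hplc : PLP (n + 1) fares src nx c) :
    ∀ (L : List (Int × Int)), (∀ e ∈ L, e ∈ g.getD nx []) →
    ∀ (q : List (Int × Int)) (kd : List Int),
      PvBase (n + 1) fares src kd → PvQProp (n + 1) fares src kd q →
      kd.getD nx 0 ≤ c →
      (∀ u, u < (n + 1).toNat → u ≠ nx → PvClosedAt (n + 1) g kd q u) →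
    let st := L.foldl (fun (st : List (Int × Int) × List Int) e =>
        if st.2.getD (pvIx (n + 1) e.1) 0 > c + e.2 then
          (pvHeappush st.1 (c + e.2, e.1), st.2.set (pvIx (n + 1) e.1) (c + e.2))
        else st) (q, kd)
    PvBase (n + 1) fares src st.2 ∧ PvQProp (n + 1) fares src st.2 st.1 ∧
      (∀ u, u < (n + 1).toNat → u ≠ nx → PvClosedAt (n + 1) g st.2 st.1 u) ∧
      (∀ e ∈ L, st.2.getD (pvIx (n + 1) e.1) 0 ≤ c + e.2) ∧
      (∀ i, st.2.getD i 0 ≤ kd.getD i 0) ∧ st.2.getD nx 0 = kd.getD nx 0 ∧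
      (∀ p ∈ q, p ∈ st.1) ∧
      2 * pvSumNat st.2 + st.1.length ≤ 2 * pvSumNat kd + q.length := by
  intro L
  induction L with
  | nil =>
    intro _ q kd hb hq hle hclE
    exact ⟨hb, hq, hclE, by simp, fun i => le_refl _, rfl, fun p hp => hp, le_refl _⟩
  | cons e L ih =>
    intro hL q kd hb hq hle hclE
    have he : e ∈ g.getD nx [] := hL e (by simp)
    have hstep := pv_relax_step hc c nx hnx hplc q kd e he hb hq hle
    obtain ⟨hb1, hq1, hcl1, htgt1, hmono1, hnx1, hsub1, hmu1⟩ := hstep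
    set st1 := if kd.getD (pvIx (n + 1) e.1) 0 > c + e.2 then
        (pvHeappush q (c + e.2, e.1), kd.set (pvIx (n + 1) e.1) (c + e.2))
      else (q, kd) with hst1
    have hle1 : st1.2.getD nx 0 ≤ c := by rw [hnx1]; exact hle
    have ihr := ih (fun e' he' => hL e' (by simp [he'])) st1.1 st1.2 hb1 hq1 hle1
      (fun u hu hun => hcl1 u hu hun (hclE u hu hun))
    have hfold : (e :: L).foldl (fun (st : List (Int × Int) × List Int) e =>
        if st.2.getD (pvIx (n + 1) e.1) 0 > c + e.2 then
          (pvHeappush st.1 (c + e.2, e.1), st.2.set (pvIx (n + 1) e.1) (c + e.2))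
        else st) (q, kd) = L.foldl (fun (st : List (Int × Int) × List Int) e =>
        if st.2.getD (pvIx (n + 1) e.1) 0 > c + e.2 then
          (pvHeappush st.1 (c + e.2, e.1), st.2.set (pvIx (n + 1) e.1) (c + e.2))
        else st) (st1.1, st1.2) := by
      rw [List.foldl_cons]
    rw [hfold]
    obtain ⟨ib, iq, icl, itgt, imono, inx, isub, imu⟩ := ihr
    refine ⟨ib, iq, icl, ?_, fun i => le_trans (imono i) (hmono1 i),
      by rw [inx, hnx1], fun p hp => isub p (hsub1 p hp), by omega⟩
    intro e' he'
    rcases List.mem_cons.mp he' with rfl | hmem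
    · exact le_trans (imono _) htgt1
    · exact itgt e' hmem

theorem pv_dijkLoop_post {n : Int} {fares : List (List Int)} {src : Nat}
    {g : List (List (Int × Int))} (hc : PvCtx n fares src g) :
    ∀ (fuel : Nat) (q : List (Int × Int)) (kd : List Int),
      PvDInv n fares src g q kd → 2 * pvSumNat kd + q.length < fuel →
      PvPost n fares src (pvDijkLoop g (n + 1) fuel q kd) := by
  intro fuel
  induction fuel with
  | zero => intro q kd _ hmu; omega
  | succ fuel ih =>
    intro q kd hinv hmu
    obtain ⟨hbase, hqp, hclo⟩ := hinv
    by_cases hqe : q.isEmpty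
    · rw [pvDijkLoop, if_pos hqe]
      refine ⟨hbase, fun x y w hE => ?_⟩
      have hqnil : q = [] := List.isEmpty_iff.mp hqe
      obtain ⟨hlen, hsrc0, hbd⟩ := hbase
      have hxN : x < (n + 1).toNat := (pv_edge_facts hc hE).1
      have hyN : y < (n + 1).toNat := (pv_edge_facts hc hE).2.1
      have hwnn : 0 ≤ w := (pv_edge_facts hc hE).2.2
      rcases hclo x hxN with hinf | ⟨p, hp, _⟩ | hadj
      · have := (hbd y hyN).2.1
        rw [hinf]
        omega
      · rw [hqnil] at hp; simp at hp
      · obtain ⟨u, v, hm, hcase⟩ := hE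
        rcases hcase with ⟨h1, h2⟩ | ⟨h1, h2⟩
        · have hmemv : ((v, w) : Int × Int) ∈ g.getD x [] :=
            (hc.gmem x hxN (v, w)).mpr ⟨u, v, hm, Or.inl ⟨h1, rfl⟩⟩
          have := hadj (v, w) hmemv
          rw [h2] at this
          exact this
        · have hmemu : ((u, w) : Int × Int) ∈ g.getD x [] :=
            (hc.gmem x hxN (u, w)).mpr ⟨u, v, hm, Or.inr ⟨h1, rfl⟩⟩
          have := hadj (u, w) hmemu
          rw [h2] at this
          exact this
    · have hne : q ≠ [] := fun hh => hqe (by simp [hh])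
      rcases hpop : pvHeappop q with ⟨mid, q1⟩
      have hpp := pv_heappop_perm q hne
      rw [hpop] at hpp
      have hmid : mid ∈ q := hpp.mem_iff.mpr (by simp)
      obtain ⟨hnxN, hplm, hkdle⟩ := hqp mid hmid
      set nx := pvIx (n + 1) mid.2 with hnx
      have hq1sub : ∀ p ∈ q1, p ∈ q := fun p hp => hpp.mem_iff.mpr (by simp [hp])
      have hqp1 : PvQProp (n + 1) fares src kd q1 := fun p hp => hqp p (hq1sub p hp)
      have hclo1 : ∀ u, u < (n + 1).toNat → u ≠ nx → PvClosedAt (n + 1) g kd q1 u := by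
        intro u hu hun
        rcases hclo u hu with h1 | ⟨p, hp, hp1, hp2⟩ | h3
        · exact Or.inl h1
        · have hpne : p ≠ mid := by
            intro hh
            subst hh
            exact hun hp1.symm
          have : p ∈ q1 := by
            rcases List.mem_cons.mp (hpp.mem_iff.mp hp) with hh | hh
            · exact absurd hh hpne
            · exact hh
          exact Or.inr (Or.inl ⟨p, this, hp1, hp2⟩)
        · exact Or.inr (Or.inr h3)
      have hfold := pv_relax_fold hc mid.1 nx hnxN hplm (g.getD nx []) (fun e he => he)
        q1 kd hbase hqp1 hkdle hclo1
      set st := (g.getD nx []).foldl (fun (st : List (Int × Int) × List Int) e =>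
          if st.2.getD (pvIx (n + 1) e.1) 0 > mid.1 + e.2 then
            (pvHeappush st.1 (mid.1 + e.2, e.1), st.2.set (pvIx (n + 1) e.1) (mid.1 + e.2))
          else st) (q1, kd) with hst
      obtain ⟨ib, iq, icl, itgt, imono, inxeq, isub, imu⟩ := hfold
      have hclonx : PvClosedAt (n + 1) g st.2 st.1 nx := by
        by_cases hval : kd.getD nx 0 = mid.1
        · refine Or.inr (Or.inr fun vw hvw => ?_)
          rw [inxeq, hval]
          exact itgt vw hvw
        · rcases hclo nx hnxN with h1 | ⟨p, hp, hp1, hp2⟩ | h3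
          · exact Or.inl (by rw [inxeq]; exact h1)
          · have hpne : p ≠ mid := by
              intro hh
              rw [hh] at hp2
              exact hval (by omega)
            have hpq1 : p ∈ q1 := by
              rcases List.mem_cons.mp (hpp.mem_iff.mp hp) with hh | hh
              · exact absurd hh hpne
              · exact hh
            exact Or.inr (Or.inl ⟨p, isub p hpq1, hp1, by rw [inxeq]; exact hp2⟩)
          · refine Or.inr (Or.inr fun vw hvw => ?_)
            rw [inxeq]
            exact le_trans (imono _) (h3 vw hvw)
      have hinv' : PvDInv n fares src g st.1 st.2 := by
        refine ⟨ib, iq, fun u hu => ?_⟩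
        by_cases hun : u = nx
        · rw [hun]; exact hclonx
        · exact icl u hu hun
      have hqlen : q.length = q1.length + 1 := by simpa using hpp.length_eq
      have hmu' : 2 * pvSumNat st.2 + st.1.length < fuel := by omega
      have hrec := ih st.1 st.2 hinv' hmu'
      rw [pvDijkLoop]
      rw [if_neg (by simp [hqe])]
      rw [hpop]
      dsimp only
      have hfun : (fun (st : List (Int × Int) × List Int) (e : Int × Int) =>
          let (q, kd) := st
          if kd.getD (pvIx (n + 1) e.1) 0 > mid.1 + e.2 then
            (pvHeappush q (mid.1 + e.2, e.1), kd.set (pvIx (n + 1) e.1) (mid.1 + e.2))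
          else st) = (fun (st : List (Int × Int) × List Int) (e : Int × Int) =>
          if st.2.getD (pvIx (n + 1) e.1) 0 > mid.1 + e.2 then
            (pvHeappush st.1 (mid.1 + e.2, e.1), st.2.set (pvIx (n + 1) e.1) (mid.1 + e.2))
          else st) := by
        funext st e
        rcases st with ⟨sq, skd⟩
        rfl
      rw [hfun, ← hnx]
      exact hrec

theorem pv_dijkstra_good {n k : Int} {fares : List (List Int)}
    {g : List (List (Int × Int))} (hc : PvCtx n fares (pvIx (n + 1) k) g) :
    PvGood (n + 1) fares (pvIx (n + 1) k) (pvDijkstra n k g) := by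
  unfold pvDijkstra
  dsimp only
  have hnum : (10000000 + 1 : Int) = 10000001 := by norm_num
  rw [hnum]
  set src := pvIx (n + 1) k with hsrcdef
  set N := (n + 1).toNat with hN
  set kd0 := (List.replicate N (10000001 : Int)).set src 0 with hkd0
  set q0 := pvHeappush [] ((0 : Int), k) with hq0
  have hsrcN : src < N := hc.hsrc
  have hlen0 : kd0.length = N := by simp [hkd0]
  have hmem0 : ∀ p, p ∈ q0 ↔ p = ((0 : Int), k) := by
    intro p
    rw [(pv_heappush_perm [] ((0 : Int), k)).mem_iff]
    simp
  have hq0len : q0.length = 1 := by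
    have := (pv_heappush_perm [] ((0 : Int), k)).length_eq
    simpa using this
  have hgsrc : kd0.getD src 0 = 0 := pv_getD_set_self _ src 0 0 (by simp; omega)
  have hgne : ∀ i, i ≠ src → i < N → kd0.getD i 0 = 10000001 := by
    intro i hi hiN
    rw [pv_getD_set_ne _ _ _ _ _ hi]
    simp [List.getD_eq_getElem?_getD, hiN]
  have hbase0 : PvBase (n + 1) fares src kd0 := by
    refine ⟨hlen0, hgsrc, fun i hi => ?_⟩
    by_cases his : i = src
    · subst his
      rw [hgsrc]
      exact ⟨le_refl 0, by norm_num [pvInf], Or.inr PLP.refl⟩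
    · rw [hgne i his hi]
      exact ⟨by norm_num, by norm_num [pvInf], Or.inl (by norm_num [pvInf])⟩
  have hqp0 : PvQProp (n + 1) fares src kd0 q0 := by
    intro p hp
    rw [hmem0] at hp
    subst hp
    refine ⟨hsrcN, ?_, ?_⟩
    · show PLP (n + 1) fares src src 0
      exact PLP.refl
    · show kd0.getD src 0 ≤ (0 : Int)
      rw [hgsrc]
  have hclo0 : ∀ u, u < N → PvClosedAt (n + 1) g kd0 q0 u := by
    intro u hu
    by_cases hus : u = src
    · subst hus
      refine Or.inr (Or.inl ⟨((0 : Int), k), (hmem0 _).mpr rfl, ?_, ?_⟩)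
      · show src = src
        rfl
      · show (0 : Int) = kd0.getD src 0
        rw [hgsrc]
    · exact Or.inl (hgne u hus hu)
  have hsum0 : pvSumNat kd0 ≤ N * 10000001 := by
    have := pv_sumNat_le kd0 10000001 (by
      intro x hx
      rcases List.mem_or_eq_of_mem_set hx with hx' | rfl
      · have := List.eq_of_mem_replicate hx'
        subst this
        omega
      · omega)
    rwa [hlen0] at this
  have hmu0 : 2 * pvSumNat kd0 + q0.length < 2 * N * 10000001 + 2 := by omega
  have hpost := pv_dijkLoop_post hc (2 * N * 10000001 + 2) q0 kd0
    ⟨hbase0, hqp0, hclo0⟩ hmu0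
  exact pv_post_good hc hpost

-- ---- graph construction ----

-- generalized build characterization
theorem pv_build_aux (n : Int) (hn : 0 ≤ n) :
    ∀ (fs : List (List Int)) (g0 : List (List (Int × Int))),
      g0.length = (n + 1).toNat →
      (∀ f ∈ fs, f.length = 3 ∧ pvInIdx n (f.getD 0 0) ∧ pvInIdx n (f.getD 1 0)) →
      (fs.foldl (fun g f =>
        match f with
        | [u, v, w] =>
          let iu := pvIx (n + 1) u
          let g1 := g.set iu (g.getD iu [] ++ [(v, w)])
          let iv := pvIx (n + 1) v
          g1.set iv (g1.getD iv [] ++ [(u, w)])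
        | _ => g) g0).length = (n + 1).toNat ∧
      ∀ x, x < (n + 1).toNat → ∀ vw : Int × Int,
        (vw ∈ (fs.foldl (fun g f =>
          match f with
          | [u, v, w] =>
            let iu := pvIx (n + 1) u
            let g1 := g.set iu (g.getD iu [] ++ [(v, w)])
            let iv := pvIx (n + 1) v
            g1.set iv (g1.getD iv [] ++ [(u, w)])
          | _ => g) g0).getD x [] ↔
          vw ∈ g0.getD x [] ∨ ∃ u v, [u, v, vw.2] ∈ fs ∧
            ((pvIx (n + 1) u = x ∧ vw.1 = v) ∨ (pvIx (n + 1) v = x ∧ vw.1 = u))) := by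
  intro fs
  induction fs with
  | nil => intro g0 hlen _; exact ⟨hlen, by simp⟩
  | cons f fs ih =>
    intro g0 hlen hrows
    have hf := hrows f (by simp)
    obtain ⟨hf3, hfu, hfv⟩ := hf
    obtain ⟨u, v, w, rfl⟩ : ∃ u v w, f = [u, v, w] := by
      match f, hf3 with
      | [u, v, w], _ => exact ⟨u, v, w, rfl⟩
    simp only [List.getD_cons_zero, List.getD_cons_succ] at hfu hfv
    simp only [List.foldl_cons]
    set iu := pvIx (n + 1) u with hiu
    set iv := pvIx (n + 1) v with hiv
    have hiuN : iu < (n + 1).toNat := pv_ix_lt n u hn hfu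
    have hivN : iv < (n + 1).toNat := pv_ix_lt n v hn hfv
    set g1 := g0.set iu (g0.getD iu [] ++ [(v, w)]) with hg1
    set g2 := g1.set iv (g1.getD iv [] ++ [(u, w)]) with hg2
    have hlen2 : g2.length = (n + 1).toNat := by simp [hg2, hg1, hlen]
    have step := ih g2 hlen2 (fun f hfm => hrows f (by simp [hfm]))
    refine ⟨step.1, fun x hx vw => ?_⟩
    rw [(step.2 x hx vw)]
    clear ih step
    -- characterize membership in g2.getD x []
    have hmem : vw ∈ g2.getD x [] ↔ vw ∈ g0.getD x [] ∨
        (iu = x ∧ vw = (v, w)) ∨ (iv = x ∧ vw = (u, w)) := by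
      by_cases hxv : x = iv
      · subst hxv
        rw [hg2, pv_getD_set_self _ _ _ _ (by simp only [hg1, List.length_set]; omega)]
        by_cases hxu : iv = iu
        · rw [hg1, ← hxu, pv_getD_set_self _ _ _ _ (by omega)]
          simp only [List.mem_append, List.mem_singleton, true_and]
          tauto
        · rw [hg1, pv_getD_set_ne _ _ _ _ _ (fun hh => hxu hh)]
          simp [List.mem_append]
          tauto
      · rw [hg2, pv_getD_set_ne _ _ _ _ _ (fun hh => hxv hh)]
        by_cases hxu : x = iu
        · subst hxu
          rw [hg1, pv_getD_set_self _ _ _ _ (by omega)]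
          simp [List.mem_append]
          tauto
        · rw [hg1, pv_getD_set_ne _ _ _ _ _ (fun hh => hxu hh)]
          tauto
    rw [hmem]
    constructor
    · rintro ((h0 | hcase) | ⟨u', v', hm, hc⟩)
      · exact Or.inl h0
      · refine Or.inr ?_
        rcases hcase with ⟨hh, rfl⟩ | ⟨hh, rfl⟩
        · exact ⟨u, v, by simp, by tauto⟩
        · exact ⟨u, v, by simp, by tauto⟩
      · exact Or.inr ⟨u', v', by simp [hm], hc⟩
    · rintro (h0 | ⟨u', v', hm, hc⟩)
      · exact Or.inl (Or.inl h0)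
      · rcases List.mem_cons.mp hm with heq | hmem'
        · -- [u', v', vw.2] = [u, v, w]
          have hu : u' = u := by injection heq
          have : v' = v ∧ vw.2 = w := by
            injection heq with h1 h2
            injection h2 with h3 h4
            injection h4 with h5
            exact ⟨h3, h5⟩
          obtain ⟨hv', hw'⟩ := this
          subst hu; subst hv'
          refine Or.inl (Or.inr ?_)
          rcases hc with ⟨hh1, hh2⟩ | ⟨hh1, hh2⟩
          · exact Or.inl ⟨hh1, by cases vw; simp_all⟩
          · exact Or.inr ⟨hh1, by cases vw; simp_all⟩
        · exact Or.inr ⟨u', v', hmem', hc⟩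

theorem pv_buildGraph_ctx {n : Int} {fares : List (List Int)} {src : Nat}
    (hn : 0 ≤ n) (hsrc : src < (n + 1).toNat)
    (rows : ∀ f ∈ fares, f.length = 3 ∧ pvInIdx n (f.getD 0 0) ∧ pvInIdx n (f.getD 1 0) ∧
      0 ≤ f.getD 2 0) :
    PvCtx n fares src (pvBuildGraph n fares) := by
  have haux := pv_build_aux n hn fares (List.replicate (n + 1).toNat [])
    (by simp) (fun f hf => ⟨(rows f hf).1, (rows f hf).2.1, (rows f hf).2.2.1⟩)
  refine ⟨hn, hsrc, rows, haux.1, fun x hx vw => ?_⟩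
  have := haux.2 x hx vw
  unfold pvBuildGraph
  rw [this]
  have hrep : (List.replicate (n + 1).toNat ([] : List (Int × Int))).getD x [] = [] := by
    simp [List.getD_eq_getElem?_getD, List.getElem?_replicate]
    split <;> rfl
  rw [hrep]
  simp

-- ---- B side ----

-- one directed relaxation attempt of B
theorem pv_brelax_one {n : Int} {fares : List (List Int)} {src : Nat}
    {g : List (List (Int × Int))} (hc : PvCtx n fares src g)
    (d : List Int) (ch : Bool) (x y : Nat) (w : Int)
    (hE : EdgeP (n + 1) fares x y w) (hb : PvBase (n + 1) fares src d) :
    let st := if d.getD x 0 + w < d.getD y 0 then (d.set y (d.getD x 0 + w), true) else (d, ch)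
    PvBase (n + 1) fares src st.1 ∧ (∀ i, st.1.getD i 0 ≤ d.getD i 0) ∧
      pvSumNat st.1 ≤ pvSumNat d ∧
      (ch = false → st.2 = false → st.1 = d ∧ ¬(d.getD x 0 + w < d.getD y 0)) ∧
      (ch = false → st.2 = true → pvSumNat st.1 < pvSumNat d) ∧
      (ch = true → st.2 = true) := by
  intro st
  obtain ⟨hlen, hsrc0, hbd⟩ := hb
  have hxN : x < (n + 1).toNat := (pv_edge_facts hc hE).1
  have hyN : y < (n + 1).toNat := (pv_edge_facts hc hE).2.1
  have hw : 0 ≤ w := (pv_edge_facts hc hE).2.2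
  by_cases hcond : d.getD x 0 + w < d.getD y 0
  · have hst : st = (d.set y (d.getD x 0 + w), true) := by
      simp only [st]; rw [if_pos hcond]
    rw [hst]
    have hylen : y < d.length := by omega
    have hxinf : d.getD x 0 ≠ pvInf := by
      have := (hbd y hyN).2.1
      unfold pvInf at *
      omega
    have hplx : PLP (n + 1) fares src x (d.getD x 0) := by
      rcases (hbd x hxN).2.2 with hh | hh
      · exact absurd hh hxinf
      · exact hh
    have hx0 : 0 ≤ d.getD x 0 := (hbd x hxN).1
    have hys : y ≠ src := by
      intro hh
      rw [hh, hsrc0] at hcond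
      omega
    have hget' : (d.set y (d.getD x 0 + w)).getD y 0 = d.getD x 0 + w :=
      pv_getD_set_self d y _ 0 hylen
    have hgetne : ∀ i, i ≠ y → (d.set y (d.getD x 0 + w)).getD i 0 = d.getD i 0 := fun i hi =>
      pv_getD_set_ne d y i _ 0 hi
    have hmono : ∀ i, (d.set y (d.getD x 0 + w)).getD i 0 ≤ d.getD i 0 := by
      intro i
      by_cases hiy : i = y
      · subst hiy; rw [hget']; omega
      · rw [hgetne i hiy]
    have hsum : pvSumNat (d.set y (d.getD x 0 + w)) < pvSumNat d :=
      pv_sumNat_set_lt d y _ hylen (by omega) hcond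
    refine ⟨⟨by simp [hlen], by rw [hgetne src (Ne.symm hys)]; exact hsrc0, fun i hi => ?_⟩,
      hmono, by show pvSumNat (d.set y (d.getD x 0 + w)) ≤ pvSumNat d; omega,
      by simp, fun _ _ => hsum, fun _ => rfl⟩
    by_cases hiy : i = y
    · rw [hiy, hget']
      have := (hbd y hyN).2.1
      exact ⟨by omega, by omega, Or.inr (hplx.step hE)⟩
    · rw [hgetne i hiy]
      exact hbd i hi
  · have hst : st = (d, ch) := by
      simp only [st]; rw [if_neg hcond]
    rw [hst]
    exact ⟨⟨hlen, hsrc0, hbd⟩, fun i => le_refl _, le_refl _,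
      fun _ _ => ⟨rfl, hcond⟩, fun h1 h2 => by simp [h1] at h2, fun h => h⟩

-- one full sweep of B's round, over any suffix L of fares
theorem pv_round_inv {n : Int} {fares : List (List Int)} {src : Nat}
    {g : List (List (Int × Int))} (hc : PvCtx n fares src g) :
    ∀ (L : List (List Int)), (∀ f ∈ L, f ∈ fares) →
    ∀ (d : List Int) (ch : Bool), PvBase (n + 1) fares src d →
    let st := L.foldl (fun st f =>
      match f with
      | [u, v, w] =>
        let iu := pvIx (n + 1) u
        let iv := pvIx (n + 1) v
        let st1 := if st.1.getD iu 0 + w < st.1.getD iv 0 then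
            (st.1.set iv (st.1.getD iu 0 + w), true) else st
        if st1.1.getD iv 0 + w < st1.1.getD iu 0 then
          (st1.1.set iu (st1.1.getD iv 0 + w), true) else st1
      | _ => st) (d, ch)
    PvBase (n + 1) fares src st.1 ∧ (∀ i, st.1.getD i 0 ≤ d.getD i 0) ∧
      pvSumNat st.1 ≤ pvSumNat d ∧
      (ch = false → st.2 = false → st.1 = d ∧
        (∀ f ∈ L, ∀ u v w : Int, f = [u, v, w] →
          d.getD (pvIx (n + 1) v) 0 ≤ d.getD (pvIx (n + 1) u) 0 + w ∧
          d.getD (pvIx (n + 1) u) 0 ≤ d.getD (pvIx (n + 1) v) 0 + w)) ∧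
      (ch = false → st.2 = true → pvSumNat st.1 < pvSumNat d) ∧
      (ch = true → st.2 = true) := by
  intro L
  induction L with
  | nil =>
    intro _ d ch hb
    exact ⟨hb, fun i => le_refl _, le_refl _, fun _ _ => ⟨rfl, by simp⟩,
      fun h1 h2 => by rw [h1] at h2; simp at h2, fun h => h⟩
  | cons f L ih =>
    intro hL d ch hb
    have hff : f ∈ fares := hL f (by simp)
    have hrow := hc.rows f hff
    obtain ⟨u, v, w, rfl⟩ : ∃ u v w, f = [u, v, w] := by
      match f, hrow.1 with
      | [u, v, w], _ => exact ⟨u, v, w, rfl⟩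
    obtain ⟨_, hfu, hfv, hfw⟩ := hrow
    simp only [List.getD_cons_zero, List.getD_cons_succ] at hfu hfv hfw
    have hE1 : EdgeP (n + 1) fares (pvIx (n + 1) u) (pvIx (n + 1) v) w :=
      ⟨u, v, hff, Or.inl ⟨rfl, rfl⟩⟩
    have hE2 : EdgeP (n + 1) fares (pvIx (n + 1) v) (pvIx (n + 1) u) w :=
      ⟨u, v, hff, Or.inr ⟨rfl, rfl⟩⟩
    have h1 := pv_brelax_one hc d ch (pvIx (n + 1) u) (pvIx (n + 1) v) w hE1 hb
    set st1 := if d.getD (pvIx (n + 1) u) 0 + w < d.getD (pvIx (n + 1) v) 0 then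
        (d.set (pvIx (n + 1) v) (d.getD (pvIx (n + 1) u) 0 + w), true) else (d, ch) with hst1
    obtain ⟨hb1, hmono1, hsum1, hnof1, hyes1, hmon1⟩ := h1
    have h2 := pv_brelax_one hc st1.1 st1.2 (pvIx (n + 1) v) (pvIx (n + 1) u) w hE2 hb1
    set st2 := if st1.1.getD (pvIx (n + 1) v) 0 + w < st1.1.getD (pvIx (n + 1) u) 0 then
        (st1.1.set (pvIx (n + 1) u) (st1.1.getD (pvIx (n + 1) v) 0 + w), true) else st1
      with hst2
    obtain ⟨hb2, hmono2, hsum2, hnof2, hyes2, hmon2⟩ := h2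
    have ihr := ih (fun f' hf' => hL f' (by simp [hf'])) st2.1 st2.2 hb2
    rw [List.foldl_cons]
    show PvBase (n + 1) fares src (List.foldl _ (st2.1, st2.2) L).1 ∧
      (∀ i, (List.foldl _ (st2.1, st2.2) L).1.getD i 0 ≤ d.getD i 0) ∧
      pvSumNat (List.foldl _ (st2.1, st2.2) L).1 ≤ pvSumNat d ∧
      (ch = false → (List.foldl _ (st2.1, st2.2) L).2 = false →
        (List.foldl _ (st2.1, st2.2) L).1 = d ∧
        (∀ f ∈ [u, v, w] :: L, ∀ u' v' w' : Int, f = [u', v', w'] →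
          d.getD (pvIx (n + 1) v') 0 ≤ d.getD (pvIx (n + 1) u') 0 + w' ∧
          d.getD (pvIx (n + 1) u') 0 ≤ d.getD (pvIx (n + 1) v') 0 + w')) ∧
      (ch = false → (List.foldl _ (st2.1, st2.2) L).2 = true →
        pvSumNat (List.foldl _ (st2.1, st2.2) L).1 < pvSumNat d) ∧
      (ch = true → (List.foldl _ (st2.1, st2.2) L).2 = true)
    obtain ⟨ib, imono, isum, inof, iyes, imon⟩ := ihr
    refine ⟨ib, fun i => le_trans (imono i) (le_trans (hmono2 i) (hmono1 i)), by omega,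
      ?_, ?_, ?_⟩
    · intro hch hst0
      have h2flag : st2.2 = false := by
        by_cases hh : st2.2 = true
        · rw [imon hh] at hst0; simp at hst0
        · simpa using hh
      have h1flag : st1.2 = false := by
        by_cases hh : st1.2 = true
        · rw [hmon2 hh] at h2flag; simp at h2flag
        · simpa using hh
      obtain ⟨heq1, hcond1⟩ := hnof1 hch h1flag
      obtain ⟨heq2, hcond2⟩ := hnof2 h1flag h2flag
      rw [heq1] at heq2 hcond2
      obtain ⟨heqI, hcondsI⟩ := inof h2flag hst0
      refine ⟨heqI.trans heq2, fun f' hf' u' v' w' hfeq => ?_⟩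
      rcases List.mem_cons.mp hf' with rfl | hmem
      · obtain ⟨rfl, rfl, rfl⟩ : u = u' ∧ v = v' ∧ w = w' := by
          injection hfeq with a1 a2
          injection a2 with b1 b2
          injection b2 with c1 _
          exact ⟨a1, b1, c1⟩
        exact ⟨by omega, by omega⟩
      · have := hcondsI f' hmem u' v' w' hfeq
        rw [heq2] at this
        exact this
    · intro hch hst1t
      by_cases hs2 : st2.2 = true
      · by_cases hs1 : st1.2 = true
        · have := hyes1 hch hs1
          omega
        · have := hyes2 (by simpa using hs1) hs2
          have heq1 := (hnof1 hch (by simpa using hs1)).1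
          rw [heq1] at this
          omega
      · have hs2f : st2.2 = false := by simpa using hs2
        have hst1f : st1.2 = false := by
          by_cases hh : st1.2 = true
          · rw [hmon2 hh] at hs2f; simp at hs2f
          · simpa using hh
        have hlt := iyes hs2f hst1t
        have heq2 := (hnof2 hst1f hs2f).1
        have heq1 := (hnof1 hch hst1f).1
        exact lt_of_lt_of_le hlt (le_of_eq (by rw [heq2, heq1]))
    · intro hch
      exact imon (hmon2 (hmon1 hch))

theorem pv_bdist_good {n k : Int} {fares : List (List Int)}
    {g : List (List (Int × Int))} (hc : PvCtx n fares (pvIx (n + 1) k) g) :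
    PvGood (n + 1) fares (pvIx (n + 1) k) (pvBDist n k fares) := by
  unfold pvBDist
  dsimp only
  set src := pvIx (n + 1) k with hsrcdef
  set N := (n + 1).toNat with hN
  set d0 := (List.replicate N (10000001 : Int)).set src 0 with hd0
  have hsrcN : src < N := hc.hsrc
  have hlen0 : d0.length = N := by simp [hd0]
  have hgsrc : d0.getD src 0 = 0 := pv_getD_set_self _ src 0 0 (by simp; omega)
  have hgne : ∀ i, i ≠ src → i < N → d0.getD i 0 = 10000001 := by
    intro i hi hiN
    rw [pv_getD_set_ne _ _ _ _ _ hi]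
    simp [List.getD_eq_getElem?_getD, hiN]
  have hbase0 : PvBase (n + 1) fares src d0 := by
    refine ⟨hlen0, hgsrc, fun i hi => ?_⟩
    by_cases his : i = src
    · subst his
      rw [hgsrc]
      exact ⟨le_refl 0, by norm_num [pvInf], Or.inr PLP.refl⟩
    · rw [hgne i his hi]
      exact ⟨by norm_num, by norm_num [pvInf], Or.inl (by norm_num [pvInf])⟩
  have hloop : ∀ (fuel : Nat) (d : List Int), PvBase (n + 1) fares src d →
      pvSumNat d < fuel → PvPost n fares src (pvRelaxLoop fares (n + 1) fuel d) := by
    intro fuel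
    induction fuel with
    | zero => intro d _ h; omega
    | succ fuel ih =>
      intro d hb hmu
      rw [pvRelaxLoop]
      unfold pvRelaxRound
      have hr := pv_round_inv hc fares (fun f hf => hf) d false hb
      obtain ⟨ib, imono, isum, inof, iyes, imon⟩ := hr
      set R := fares.foldl (fun (st : List Int × Bool) (f : List Int) =>
          match f with
          | [u, v, w] =>
            let iu := pvIx (n + 1) u
            let iv := pvIx (n + 1) v
            let st1 := if st.1.getD iu 0 + w < st.1.getD iv 0 then
              (st.1.set iv (st.1.getD iu 0 + w), true) else st
            if st1.1.getD iv 0 + w < st1.1.getD iu 0 then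
              (st1.1.set iu (st1.1.getD iv 0 + w), true) else st1
          | _ => st) (d, false) with hR
      show PvPost n fares src (if R.2 = true then pvRelaxLoop fares (n + 1) fuel R.1 else R.1)
      by_cases hflag : R.2 = true
      · rw [if_pos hflag]
        have hlt := iyes rfl hflag
        exact ih _ ib (by omega)
      · rw [if_neg hflag]
        obtain ⟨heq, hconds⟩ := inof rfl (by simpa using hflag)
        refine ⟨by rw [heq]; exact hb, fun x y w hE => ?_⟩
        rw [heq]
        obtain ⟨u, v, hm, hcase⟩ := hE
        have hcond := hconds [u, v, w] hm u v w rfl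
        rcases hcase with ⟨h1, h2⟩ | ⟨h1, h2⟩
        · rw [← h1, ← h2]
          exact hcond.1
        · rw [← h1, ← h2]
          exact hcond.2
  have hsum0 : pvSumNat d0 ≤ N * 10000001 := by
    have := pv_sumNat_le d0 10000001 (by
      intro x hx
      rcases List.mem_or_eq_of_mem_set hx with hx' | rfl
      · have := List.eq_of_mem_replicate hx'
        subst this
        omega
      · omega)
    rwa [hlen0] at this
  have hpost := hloop (N * 10000001 + 1) d0 hbase0 (by omega)
  exact pv_post_good hc hpost

-- ---- glue ----

theorem pv_dist_eq {n k : Int} {fares : List (List Int)}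
    (hn : 0 ≤ n)
    (rows : ∀ f ∈ fares, f.length = 3 ∧ pvInIdx n (f.getD 0 0) ∧ pvInIdx n (f.getD 1 0) ∧
      0 ≤ f.getD 2 0)
    (hk : pvInIdx n k) :
    pvDijkstra n k (pvBuildGraph n fares) = pvBDist n k fares := by
  have hsrc : pvIx (n + 1) k < (n + 1).toNat := pv_ix_lt _ _ hn hk
  have hc := pv_buildGraph_ctx hn hsrc rows
  exact pv_good_unique (pv_dijkstra_good hc) (pv_bdist_good hc)

-- ===== VERDICT (by name: the statement is the Claim_ definition above) =====
theorem solution_spec : Claim_equal_solution := by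
  intro n s a b fares _ hpre
  obtain ⟨hn, hs, ha, hb, rows⟩ := hpre
  unfold Spec_solution solution solution_alt
  dsimp only
  rw [pv_dist_eq hn rows hs, pv_dist_eq hn rows ha, pv_dist_eq hn rows hb]
  omega
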